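-- pv_equiv track=rewrite | github.com/aegiskeller/processPhotometry | analyze_photometry.py | collect_star_labels
-- ===== SOURCE A (Python) =====
-- from typing import Iterable, Mapping
--
-- def collect_star_labels(header: Iterable[str]) -> list[str]:
--     labels = []
--     for column in header:
--         if column.startswith("Source_AMag_"):
--             labels.append(column.removeprefix("Source_AMag_"))
--     # Preserve natural ordering by preferring target/check before comparisons.
--     def sort_key(label: str) -> tuple[int, str]:
--         if label == "T1":
--             return (0, label)
--         if label == "T2":
--             return (1, label)
--         if label.startswith("C"):
--             return (2, label)
--         return (3, label)
--
--     return sorted(labels, key=sort_key)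
-- ===== SOURCE B (Python) =====
-- def collect_star_labels(header):
--     labels = [column[len("Source_AMag_"):] for column in header
--               if column.startswith("Source_AMag_")]
--     t1, t2, comps, others = [], [], [], []
--     for label in labels:
--         if label == "T1":
--             t1.append(label)
--         elif label == "T2":
--             t2.append(label)
--         elif label.startswith("C"):
--             comps.append(label)
--         else:
--             others.append(label)
--     return sorted(t1) + sorted(t2) + sorted(comps) + sorted(others)
-- ===== Notes on version B (the rewrite author's own statement) =====
-- stated objective: alternative
-- what changed: Replaces the single composite-key sort (bucket rank, label) by a one-pass partition into four explicit buckets (T1, T2, C-labels, others), each sorted plainly by label and concatenated in bucket order.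
import Mathlib
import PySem

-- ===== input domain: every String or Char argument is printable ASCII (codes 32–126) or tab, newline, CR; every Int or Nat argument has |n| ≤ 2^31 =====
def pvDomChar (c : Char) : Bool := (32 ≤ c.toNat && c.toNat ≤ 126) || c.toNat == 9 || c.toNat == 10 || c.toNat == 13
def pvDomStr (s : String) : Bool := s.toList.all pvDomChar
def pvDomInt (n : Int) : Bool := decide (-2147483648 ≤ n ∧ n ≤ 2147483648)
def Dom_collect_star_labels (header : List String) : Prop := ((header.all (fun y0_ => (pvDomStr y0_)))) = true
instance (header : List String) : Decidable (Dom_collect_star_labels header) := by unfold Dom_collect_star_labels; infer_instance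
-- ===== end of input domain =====

-- B replaces A's single composite-key sort by a one-pass partition into four buckets (T1/T2/C/others),
-- each sorted plainly and concatenated in bucket order (alternative decomposition, same cost).

-- ===== PORT A =====
-- column.removeprefix("Source_AMag_") after the startswith check == drop the 12 prefix chars (exact on every string)
def pvStrip (s : String) : String := String.ofList (s.toList.drop 12)

-- the tuple key's first component (the tuple itself is passed to sorted2 as its two components)
def pvSortKey1 (label : String) : Int :=
  if label = "T1" then 0
  else if label = "T2" then 1
  else if PySem.Str.startswith label "C" then 2
  else 3

def collect_star_labels (header : List String) : List String :=
  let labels := header.foldl (fun acc column =>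
    if PySem.Str.startswith column "Source_AMag_" then acc ++ [pvStrip column] else acc) []
  PySem.List.sorted2 labels pvSortKey1 (fun label => label) false

-- ===== PORT B =====
def collect_star_labels_alt (header : List String) : List String :=
  -- labels = [column[12:] for column in header if column.startswith("Source_AMag_")]
  let labels := (header.filter (fun column => PySem.Str.startswith column "Source_AMag_")).map pvStrip
  -- one pass: partition into the four buckets with an if/elif chain
  let p := labels.foldl (fun acc label =>
      if label = "T1" then (acc.1 ++ [label], acc.2.1, acc.2.2.1, acc.2.2.2)
      else if label = "T2" then (acc.1, acc.2.1 ++ [label], acc.2.2.1, acc.2.2.2)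
      else if PySem.Str.startswith label "C" then (acc.1, acc.2.1, acc.2.2.1 ++ [label], acc.2.2.2)
      else (acc.1, acc.2.1, acc.2.2.1, acc.2.2.2 ++ [label]))
    (([], [], [], []) : List String × List String × List String × List String)
  PySem.List.sorted p.1 (fun x => x) false ++ PySem.List.sorted p.2.1 (fun x => x) false ++
    PySem.List.sorted p.2.2.1 (fun x => x) false ++ PySem.List.sorted p.2.2.2 (fun x => x) false

-- ===== PRECONDITION & SPEC =====
def Spec_collect_star_labels (header : List String) (out : List String) : Prop := out = collect_star_labels_alt header
instance (header : List String) (out : List String) : Decidable (Spec_collect_star_labels header out) := by unfold Spec_collect_star_labels; infer_instance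

-- ===== CLAIM (what is proved, stated in full; the proofs are below) =====
def Claim_equal_collect_star_labels : Prop := ∀ (header : List String), Dom_collect_star_labels header → Spec_collect_star_labels header (collect_star_labels header)

-- ===== LEMMAS AND PROOFS =====

-- the four (mutually exclusive, exhaustive) bucket predicates of B's if/elif chain
def pvQ0 (l : String) : Bool := decide (l = "T1")
def pvQ1 (l : String) : Bool := !decide (l = "T1") && decide (l = "T2")
def pvQ2 (l : String) : Bool := !decide (l = "T1") && !decide (l = "T2") && PySem.Str.startswith l "C"
def pvQ3 (l : String) : Bool := !decide (l = "T1") && !decide (l = "T2") && !PySem.Str.startswith l "C"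

-- the composite key as a single lexicographic value
def pvKey (l : String) : Lex (Int × String) := toLex (pvSortKey1 l, l)

lemma pvKey_inj : Function.Injective pvKey := by
  intro a b h
  have := congrArg (fun x => (ofLex x).2) h
  simpa [pvKey] using this

lemma pvLt_eq :
    (fun a b => decide (pvSortKey1 a < pvSortKey1 b) ||
      (!decide (pvSortKey1 b < pvSortKey1 a) && decide (a < b))) =
    (fun a b => decide (pvKey a < pvKey b)) := by
  funext a b
  by_cases h1 : pvSortKey1 a < pvSortKey1 b <;>
    by_cases h2 : pvSortKey1 b < pvSortKey1 a <;>
      by_cases h3 : a < b <;>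
        simp [pvKey, Prod.Lex.lt_iff, h1, h2, h3] <;> omega

lemma pvSorted2_eq (labels : List String) :
    PySem.List.sorted2 labels pvSortKey1 (fun l => l) false =
    PySem.List.sorted labels pvKey false := by
  show labels.foldl (fun acc x => PySem.List.insertBy
      (fun a b => decide (pvSortKey1 a < pvSortKey1 b) ||
        (!decide (pvSortKey1 b < pvSortKey1 a) && decide (a < b))) x acc) [] = _
  rw [pvLt_eq, ← PySem.List.sorted_eq_foldl_insertBy]

-- the partition fold computes the four filters
lemma pvPart_eq (ls : List String)
    (t1 t2 cs os : List String) :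
    ls.foldl (fun acc label =>
      if label = "T1" then (acc.1 ++ [label], acc.2.1, acc.2.2.1, acc.2.2.2)
      else if label = "T2" then (acc.1, acc.2.1 ++ [label], acc.2.2.1, acc.2.2.2)
      else if PySem.Str.startswith label "C" then (acc.1, acc.2.1, acc.2.2.1 ++ [label], acc.2.2.2)
      else (acc.1, acc.2.1, acc.2.2.1, acc.2.2.2 ++ [label])) (t1, t2, cs, os) =
    (t1 ++ ls.filter pvQ0, t2 ++ ls.filter pvQ1, cs ++ ls.filter pvQ2, os ++ ls.filter pvQ3) := by
  induction ls generalizing t1 t2 cs os with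
  | nil => simp
  | cons l ls ih =>
    simp only [List.foldl_cons]
    by_cases h1 : l = "T1"
    · rw [if_pos h1, ih]
      simp [pvQ0, pvQ1, pvQ2, pvQ3, h1]
    · rw [if_neg h1]
      by_cases h2 : l = "T2"
      · rw [if_pos h2, ih]
        simp [pvQ0, pvQ1, pvQ2, pvQ3, h2]
      · rw [if_neg h2]
        by_cases h3 : PySem.Str.startswith l "C" = true
        · have h3' : PySem.Chars.startswith l.toList ['C'] = true := by simpa using h3
          rw [if_pos h3, ih]
          simp [pvQ0, pvQ1, pvQ2, pvQ3, h1, h2, h3']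
        · have h3' : PySem.Chars.startswith l.toList ['C'] = false := by simpa using h3
          rw [if_neg h3, ih]
          simp [pvQ0, pvQ1, pvQ2, pvQ3, h1, h2, h3']

lemma pvPermAux {α : Type} (a : α) (u v w : List α) (h : (u ++ v).Perm w) :
    (u ++ a :: v).Perm (a :: w) := List.perm_middle.trans (h.cons a)

lemma pvPart_perm (ls : List String) :
    (ls.filter pvQ0 ++ ls.filter pvQ1 ++ ls.filter pvQ2 ++ ls.filter pvQ3).Perm ls := by
  induction ls with
  | nil => simp
  | cons l ls ih =>
    have ih' : (ls.filter pvQ0 ++ (ls.filter pvQ1 ++ (ls.filter pvQ2 ++ ls.filter pvQ3))).Perm ls := by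
      simpa [List.append_assoc] using ih
    by_cases h1 : l = "T1"
    · simpa [pvQ0, pvQ1, pvQ2, pvQ3, List.filter_cons, h1, List.append_assoc] using
        pvPermAux l [] (ls.filter pvQ0 ++ (ls.filter pvQ1 ++ (ls.filter pvQ2 ++ ls.filter pvQ3))) ls ih'
    · by_cases h2 : l = "T2"
      · simpa [pvQ0, pvQ1, pvQ2, pvQ3, List.filter_cons, h1, h2, List.append_assoc] using
          pvPermAux l (ls.filter pvQ0) (ls.filter pvQ1 ++ (ls.filter pvQ2 ++ ls.filter pvQ3)) ls ih'
      · by_cases h3 : PySem.Str.startswith l "C" = true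
        · have h3' : PySem.Chars.startswith l.toList ['C'] = true := by simpa using h3
          simpa [pvQ0, pvQ1, pvQ2, pvQ3, List.filter_cons, h1, h2, h3', List.append_assoc] using
            pvPermAux l (ls.filter pvQ0 ++ ls.filter pvQ1) (ls.filter pvQ2 ++ ls.filter pvQ3) ls
              (by simpa [List.append_assoc] using ih')
        · have h3' : PySem.Chars.startswith l.toList ['C'] = false := by simpa using h3
          simpa [pvQ0, pvQ1, pvQ2, pvQ3, List.filter_cons, h1, h2, h3', List.append_assoc] using
            pvPermAux l (ls.filter pvQ0 ++ (ls.filter pvQ1 ++ ls.filter pvQ2)) (ls.filter pvQ3) ls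
              (by simpa [List.append_assoc] using ih')

lemma pvK_of_q0 {l : String} (h : pvQ0 l = true) : pvSortKey1 l = 0 := by
  simp [pvQ0] at h; simp [pvSortKey1, h]
lemma pvK_of_q1 {l : String} (h : pvQ1 l = true) : pvSortKey1 l = 1 := by
  simp [pvQ1] at h; simp [pvSortKey1, h.2]
lemma pvK_of_q2 {l : String} (h : pvQ2 l = true) : pvSortKey1 l = 2 := by
  simp [pvQ2] at h; obtain ⟨⟨ha, hb⟩, hc⟩ := h; simp [pvSortKey1, ha, hb, hc]
lemma pvK_of_q3 {l : String} (h : pvQ3 l = true) : pvSortKey1 l = 3 := by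
  simp [pvQ3] at h; obtain ⟨⟨ha, hb⟩, hc⟩ := h; simp [pvSortKey1, ha, hb, hc]

lemma pvKey_le_of_lt {a b : String} (h : pvSortKey1 a < pvSortKey1 b) : pvKey a ≤ pvKey b := by
  rw [pvKey, pvKey, Prod.Lex.le_iff]; left; simpa using h

lemma pvKey_le_of_eq {a b : String} (h : pvSortKey1 a = pvSortKey1 b) (h2 : a ≤ b) :
    pvKey a ≤ pvKey b := by
  rw [pvKey, pvKey, Prod.Lex.le_iff]; right; exact ⟨by simpa using h, by simpa using h2⟩

-- pairwise key-sortedness within one sorted bucket (all its members share the key's first component)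
lemma pvPairwise_bucket (q : String → Bool) (i : Int) (ls : List String)
    (hk : ∀ l, q l = true → pvSortKey1 l = i) :
    ((PySem.List.sorted (ls.filter q) (fun x => x) false).Pairwise
      (fun a b => pvKey a ≤ pvKey b)) := by
  have hp := PySem.List.sorted_pairwise (ls.filter q) (fun x => x)
  refine hp.imp_of_mem ?_
  intro a b ha hb hab
  have ha' := List.of_mem_filter ((PySem.List.mem_sorted _ _ _ _).1 ha)
  have hb' := List.of_mem_filter ((PySem.List.mem_sorted _ _ _ _).1 hb)
  exact pvKey_le_of_eq ((hk a ha').trans (hk b hb').symm) hab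

lemma pvMem_sorted_filter_key {q : String → Bool} {i : Int} {ls : List String} {a : String}
    (hk : ∀ l, q l = true → pvSortKey1 l = i)
    (ha : a ∈ PySem.List.sorted (ls.filter q) (fun x => x) false) : pvSortKey1 a = i :=
  hk a (List.of_mem_filter ((PySem.List.mem_sorted _ _ _ _).1 ha))

-- ===== VERDICT (by name: the statement is the Claim_ definition above) =====
theorem collect_star_labels_spec : Claim_equal_collect_star_labels := by
  intro header _
  unfold Spec_collect_star_labels collect_star_labels collect_star_labels_alt
  simp only [PySem.List.foldl_append_if, List.nil_append, pvPart_eq, pvSorted2_eq]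
  set L := (header.filter (fun column => PySem.Str.startswith column "Source_AMag_")).map pvStrip with hL
  -- both sides are key-pairwise-sorted permutations of L
  have hperm : (PySem.List.sorted L pvKey false).Perm
      (PySem.List.sorted (L.filter pvQ0) (fun x => x) false ++
       PySem.List.sorted (L.filter pvQ1) (fun x => x) false ++
       PySem.List.sorted (L.filter pvQ2) (fun x => x) false ++
       PySem.List.sorted (L.filter pvQ3) (fun x => x) false) := by
    refine (PySem.List.sorted_perm L pvKey false).trans ?_
    refine (pvPart_perm L).symm.trans ?_
    exact ((((PySem.List.sorted_perm _ _ false).append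
      (PySem.List.sorted_perm _ _ false)).append
      (PySem.List.sorted_perm _ _ false)).append
      (PySem.List.sorted_perm _ _ false)).symm
  have hpw1 := PySem.List.sorted_pairwise L pvKey
  have hpw2 : (PySem.List.sorted (L.filter pvQ0) (fun x => x) false ++
       PySem.List.sorted (L.filter pvQ1) (fun x => x) false ++
       PySem.List.sorted (L.filter pvQ2) (fun x => x) false ++
       PySem.List.sorted (L.filter pvQ3) (fun x => x) false).Pairwise
      (fun a b => pvKey a ≤ pvKey b) := by
    rw [List.pairwise_append, List.pairwise_append, List.pairwise_append]
    refine ⟨⟨⟨pvPairwise_bucket pvQ0 0 L (fun l => pvK_of_q0),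
              pvPairwise_bucket pvQ1 1 L (fun l => pvK_of_q1), ?_⟩,
            pvPairwise_bucket pvQ2 2 L (fun l => pvK_of_q2), ?_⟩,
          pvPairwise_bucket pvQ3 3 L (fun l => pvK_of_q3), ?_⟩
    · intro a ha b hb
      exact pvKey_le_of_lt (by
        rw [pvMem_sorted_filter_key (fun l => pvK_of_q0) ha,
            pvMem_sorted_filter_key (fun l => pvK_of_q1) hb]; norm_num)
    · intro a ha b hb
      rcases List.mem_append.1 ha with h | h
      · exact pvKey_le_of_lt (by
          rw [pvMem_sorted_filter_key (fun l => pvK_of_q0) h,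
              pvMem_sorted_filter_key (fun l => pvK_of_q2) hb]; norm_num)
      · exact pvKey_le_of_lt (by
          rw [pvMem_sorted_filter_key (fun l => pvK_of_q1) h,
              pvMem_sorted_filter_key (fun l => pvK_of_q2) hb]; norm_num)
    · intro a ha b hb
      have hb3 := pvMem_sorted_filter_key (fun l => pvK_of_q3) hb
      rcases List.mem_append.1 ha with h | h
      · rcases List.mem_append.1 h with h' | h'
        · exact pvKey_le_of_lt (by
            rw [pvMem_sorted_filter_key (fun l => pvK_of_q0) h', hb3]; norm_num)
        · exact pvKey_le_of_lt (by
            rw [pvMem_sorted_filter_key (fun l => pvK_of_q1) h', hb3]; norm_num)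
      · exact pvKey_le_of_lt (by
          rw [pvMem_sorted_filter_key (fun l => pvK_of_q2) h, hb3]; norm_num)
  exact PySem.List.eq_of_perm_of_pairwise_le_of_injective pvKey pvKey_inj hperm hpw1 hpw2
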